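-- pv_equiv track=rewrite | github.com/bombrary/pdf-rearrange | pdf_rearrange/__init__.py | full_page_indicies
-- ===== SOURCE A (Python) =====
-- def full_page_indicies(chunk, num_pages):
--     # convert chunk to 0-indexed
--     chunk = [i - 1 for i in chunk]
--
--     chunk_size = len(chunk)
--
--     # the number of pages is a multiple of chunk_size
--     new_num_pages = (num_pages + chunk_size - 1) // chunk_size * chunk_size
--
--     new_page_indicies = []
--     for i in range(new_num_pages):
--         new_i = chunk[i % chunk_size] + (i // chunk_size) * chunk_size
--         new_page_indicies.append(new_i)
--
--     return new_page_indicies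
-- ===== SOURCE B (Python) =====
-- def full_page_indicies(chunk, num_pages):
--     # incremental block shifting: each block is the previous block with chunk_size
--     # added elementwise; no i % k / i // k decoding and no b*k multiplication.
--     k = len(chunk)
--     blocks = -(-num_pages // k)  # ceil(num_pages / k); ZeroDivisionError on empty chunk, as in A
--     out = []
--     cur = [c - 1 for c in chunk]
--     for _ in range(blocks):
--         out.extend(cur)
--         cur = [x + k for x in cur]
--     return out
-- ===== Notes on version B (the rewrite author's own statement) =====
-- stated objective: alternative
-- what changed: Instead of decoding each flat index with i % chunk_size and i // chunk_size, B maintains a running block (the previous block shifted elementwise by chunk_size) and extends the output block by block, with ceil division -(-n//k) giving the block count; no per-element modular/floor-division arithmetic at all.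
import Mathlib
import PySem

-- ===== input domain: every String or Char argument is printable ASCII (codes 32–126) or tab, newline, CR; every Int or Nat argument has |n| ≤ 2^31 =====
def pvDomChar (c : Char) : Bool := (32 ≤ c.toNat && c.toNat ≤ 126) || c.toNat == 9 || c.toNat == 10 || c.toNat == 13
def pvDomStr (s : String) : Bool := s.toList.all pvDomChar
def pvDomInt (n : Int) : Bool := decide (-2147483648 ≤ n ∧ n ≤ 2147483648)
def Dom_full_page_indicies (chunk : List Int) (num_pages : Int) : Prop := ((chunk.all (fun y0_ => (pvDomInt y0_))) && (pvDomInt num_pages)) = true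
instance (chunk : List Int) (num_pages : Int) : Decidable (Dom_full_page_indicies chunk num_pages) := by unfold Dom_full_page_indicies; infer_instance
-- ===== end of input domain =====

-- B replaces A's flat loop with per-element i % k / i // k index decoding by a running block shifted elementwise each iteration (alternative decomposition, same cost).


-- ===== PORT A =====
-- literal port of A: flat loop over range(new_num_pages), decoding positions with i % chunk_size and i // chunk_size
-- (the index i % chunk_size is always in range when chunk ≠ [], so pyGetD's default is never used under Pre_)
def full_page_indicies (chunk : List Int) (num_pages : Int) : List Int :=
  let chunk1 := chunk.map (fun i => i - 1)
  let chunk_size : Int := PySem.List.len chunk1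
  let new_num_pages := PySem.Int.floordiv (num_pages + chunk_size - 1) chunk_size * chunk_size
  (PySem.List.pyRange 0 new_num_pages 1).foldl
    (fun acc i =>
      acc ++ [PySem.List.pyGetD chunk1 (PySem.Int.mod i chunk_size) 0
                + PySem.Int.floordiv i chunk_size * chunk_size]) []

-- ===== PORT B =====
-- literal port of B: for-loop over range(blocks) carrying (out, cur); each step extends out with
-- cur and shifts cur elementwise by k
def full_page_indicies_alt (chunk : List Int) (num_pages : Int) : List Int :=
  let k : Int := PySem.List.len chunk
  let blocks := - PySem.Int.floordiv (- num_pages) k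
  let cur0 := chunk.map (fun c => c - 1)
  ((PySem.List.pyRange 0 blocks 1).foldl
      (fun (st : List Int × List Int) _ => (st.1 ++ st.2, st.2.map (fun x => x + k)))
      ([], cur0)).1

-- ===== PRECONDITION & SPEC =====
-- Pre_ excludes the empty chunk, on which both A and B raise ZeroDivisionError (division by chunk_size = 0)
def Pre_full_page_indicies (chunk : List Int) (num_pages : Int) : Prop := chunk ≠ []
instance (chunk : List Int) (num_pages : Int) : Decidable (Pre_full_page_indicies chunk num_pages) := by unfold Pre_full_page_indicies; infer_instance
def pvWitness_full_page_indicies : List Int × Int := ([1, 3, 2], 5)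

def Spec_full_page_indicies (chunk : List Int) (num_pages : Int) (out : List Int) : Prop := out = full_page_indicies_alt chunk num_pages
instance (chunk : List Int) (num_pages : Int) (out : List Int) : Decidable (Spec_full_page_indicies chunk num_pages out) := by unfold Spec_full_page_indicies; infer_instance

-- ===== CLAIM (what is proved, stated in full; the proofs are below) =====
def Claim_equal_full_page_indicies : Prop := ∀ (chunk : List Int) (num_pages : Int), Dom_full_page_indicies chunk num_pages → Pre_full_page_indicies chunk num_pages → Spec_full_page_indicies chunk num_pages (full_page_indicies chunk num_pages)

-- ===== LEMMAS AND PROOFS =====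

-- one block of A's flat range, mapped through the % / // decoder, equals the shifted base block
lemma block_eq (base : List Int) (b : Int) (_hb : 0 ≤ b) (hbase : base ≠ []) :
    (PySem.List.pyRange (b * base.length) ((b + 1) * base.length) 1).map
      (fun i => PySem.List.pyGetD base (PySem.Int.mod i base.length) 0
                  + PySem.Int.floordiv i base.length * base.length)
    = base.map (fun c => c + b * base.length) := by
  have hk : (0 : Int) < base.length := by
    have := List.length_pos_iff.mpr hbase; exact_mod_cast this
  rw [PySem.List.pyRange_one]
  have hlen : ((b + 1) * (base.length : Int) - b * base.length).toNat = base.length := by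
    have : (b + 1) * (base.length : Int) - b * base.length = base.length := by ring
    rw [this]; exact Int.toNat_natCast _
  rw [hlen]
  apply List.ext_getElem
  · simp
  · intro j h1 h2
    simp only [List.getElem_map, List.getElem_range]
    have hj : j < base.length := by simpa using h2
    have hfd : PySem.Int.floordiv (b * base.length + j) base.length = b := by
      rw [PySem.Int.floordiv_eq_iff_of_pos hk]
      constructor
      · have : (0:Int) ≤ j := by positivity
        omega
      · have hjl : (j : Int) < base.length := by exact_mod_cast hj
        have : (b + 1) * (base.length : Int) = b * base.length + base.length := by ring
        omega
    have hmod : PySem.Int.mod (b * base.length + j) base.length = j := by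
      have := PySem.Int.floordiv_mul_add_mod (b * base.length + j) base.length
      rw [hfd] at this; omega
    rw [hmod, hfd]
    rw [PySem.List.pyGetD_natCast]
    simp [List.getD, hj]

-- A's flat map over range(0, n*k) splits into the blockwise concatenation
lemma split_blocks (base : List Int) (hbase : base ≠ []) (f : Int → Int)
    (hf : ∀ b : Int, 0 ≤ b →
      (PySem.List.pyRange (b * base.length) ((b + 1) * base.length) 1).map f
        = base.map (fun c => c + b * (base.length : Int))) :
    ∀ n : Nat,
      (PySem.List.pyRange 0 ((n : Int) * base.length) 1).map f
        = (PySem.List.pyRange 0 (n : Int) 1).flatMap (fun b => base.map (fun c => c + b * (base.length : Int))) := by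
  intro n
  induction n with
  | zero => simp [PySem.List.pyRange_one_eq_nil]
  | succ n ih =>
    have hk : (0 : Int) < base.length := by
      have := List.length_pos_iff.mpr hbase; exact_mod_cast this
    have h1 : (0 : Int) ≤ (n : Int) * base.length := by positivity
    have h2 : (n : Int) * base.length ≤ ((n : Int) + 1) * base.length := by
      have : ((n : Int) + 1) * base.length = (n : Int) * base.length + base.length := by ring
      omega
    have hsplit := PySem.List.pyRange_one_append 0 ((n : Int) * base.length) (((n : Int) + 1) * base.length) h1 h2
    have hcast : ((n + 1 : Nat) : Int) = (n : Int) + 1 := by push_cast; ring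
    rw [hcast, hsplit, List.map_append, ih, hf n (by positivity),
        PySem.List.pyRange_one_succ_right (by positivity : (0:Int) ≤ (n:Int))]
    simp

-- B's fold: after n iterations out = the first n blocks concatenated, and cur = base shifted by n*k
lemma fold_spec (base : List Int) (k : Int) :
    ∀ n : Nat,
      (PySem.List.pyRange 0 (n : Int) 1).foldl
          (fun (st : List Int × List Int) _ => (st.1 ++ st.2, st.2.map (fun x => x + k)))
          ([], base)
        = ((PySem.List.pyRange 0 (n : Int) 1).flatMap (fun b => base.map (fun c => c + b * k)),
           base.map (fun c => c + (n : Int) * k)) := by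
  intro n
  induction n with
  | zero =>
    simp [PySem.List.pyRange_one_eq_nil]
  | succ n ih =>
    have hcast : ((n + 1 : Nat) : Int) = (n : Int) + 1 := by push_cast; ring
    rw [hcast, PySem.List.pyRange_one_succ_right (by positivity : (0:Int) ≤ (n:Int))]
    rw [List.foldl_append, ih]
    simp only [List.foldl_cons, List.foldl_nil, List.flatMap_append, List.flatMap_cons,
      List.flatMap_nil, List.append_nil, List.map_map]
    rw [Prod.mk.injEq]
    refine ⟨rfl, ?_⟩
    exact List.map_congr_left (fun c _ => by simp only [Function.comp_apply]; ring)

-- ceiling division: (n + k - 1) // k = -((-n) // k) for k > 0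
lemma ceil_div_eq (n k : Int) (hk : 0 < k) :
    PySem.Int.floordiv (n + k - 1) k = - PySem.Int.floordiv (-n) k := by
  set q := - PySem.Int.floordiv (-n) k with hq
  have hb := (PySem.Int.neg_floordiv_neg_eq_iff_of_pos hk (a := n) (q := q)).mpr
  have hbq : (q - 1) * k < n ∧ n ≤ q * k := by
    have := (PySem.Int.neg_floordiv_neg_eq_iff_of_pos hk (a := n) (q := q)).mp hq.symm
    exact this
  rw [PySem.Int.floordiv_eq_iff_of_pos hk]
  obtain ⟨h1, h2⟩ := hbq
  have e1 : (q - 1) * k = q * k - k := by ring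
  have e2 : (q + 1) * k = q * k + k := by ring
  constructor <;> omega

theorem full_page_indicies_spec : Claim_equal_full_page_indicies := by
  intro chunk num_pages _ hpre
  unfold Spec_full_page_indicies full_page_indicies full_page_indicies_alt
  simp only []
  set base := chunk.map (fun c => c - 1) with hbase_def
  have hpre' : chunk ≠ [] := hpre
  have hbase : base ≠ [] := by simp [hbase_def, hpre']
  have hk : (0 : Int) < base.length := by
    have := List.length_pos_iff.mpr hbase; exact_mod_cast this
  have hlen : PySem.List.len base = (base.length : Int) := by simp [PySem.List.len_eq]
  have hlenc : PySem.List.len chunk = (base.length : Int) := by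
    simp [PySem.List.len_eq, hbase_def]
  rw [hlen, hlenc]
  -- the two block counts agree
  have hblocks : PySem.Int.floordiv (num_pages + (base.length : Int) - 1) base.length
      = - PySem.Int.floordiv (- num_pages) base.length := ceil_div_eq num_pages base.length hk
  rw [hblocks]
  set blocks := - PySem.Int.floordiv (- num_pages) base.length with hbl
  rcases Int.lt_or_le 0 blocks with hb | hb
  · obtain ⟨n, hn⟩ : ∃ n : Nat, blocks = (n : Int) := ⟨blocks.toNat, (Int.toNat_of_nonneg hb.le).symm⟩
    rw [hn, fold_spec base (base.length : Int) n]
    rw [PySem.List.foldl_append_singleton_eq_map]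
    simp only [List.nil_append]
    exact split_blocks base hbase _ (fun b hb' => block_eq base b hb' hbase) n
  · have h1 : blocks * (base.length : Int) ≤ 0 := mul_nonpos_of_nonpos_of_nonneg hb hk.le
    rw [PySem.List.pyRange_one_eq_nil h1, PySem.List.pyRange_one_eq_nil hb]
    simp
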